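-- pv_equiv track=rewrite | github.com/Ali-Baghban/FAT | FAT.py | alphaCounter
-- ===== SOURCE A (Python) =====
-- def alphaCounter(text):
--     alpha = {'a':0,'b':0,'c':0,'d':0,'e':0,'f':0,'g':0,'h':0,'i':0,'j':0,'k':0,'l':0,'m':0,
--     'n':0,'o':0,'p':0,'q':0,'r':0,'s':0,'t':0,'u':0,'v':0,'w':0,'x':0,'y':0,'z':0,' ':0,}
--     for ch in text :
--         if ch == 'a':
--             alpha['a'] = alpha['a']+1
--         elif ch == 'b':
--             alpha['b'] = alpha['b']+1
--         elif ch == 'c':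
--             alpha['c'] = alpha['c']+1
--         elif ch == 'd':
--             alpha['d'] = alpha['d']+1
--         elif ch == 'e':
--             alpha['e'] = alpha['e']+1
--         elif ch == 'f' :
--             alpha['f'] = alpha['f']+1
--         elif ch == 'g':
--             alpha['g'] = alpha['g']+1
--         elif ch == 'h':
--             alpha['h'] = alpha['h']+1
--         elif ch == 'i':
--             alpha['i'] = alpha['i']+1
--         elif ch == 'j':
--             alpha['j'] = alpha['j']+1
--         elif ch == 'k':
--             alpha['k'] = alpha['k']+1
--         elif ch == 'l':
--             alpha['l'] = alpha['l']+1
--         elif ch == 'm':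
--             alpha['m'] = alpha['m']+1
--         elif ch == 'n' :
--             alpha['n'] = alpha['n']+1
--         elif ch == 'o':
--             alpha['o'] = alpha['o']+1
--         elif ch == 'p':
--             alpha['p'] = alpha['p']+1
--         elif ch == 'q':
--             alpha['q'] = alpha['q']+1
--         elif ch == 'r':
--             alpha['r'] = alpha['r']+1
--         elif ch == 's':
--             alpha['s'] = alpha['s']+1
--         elif ch == 't':
--             alpha['t'] = alpha['t']+1
--         elif ch == 'u':
--             alpha['u'] = alpha['u']+1
--         elif ch == 'v' :
--             alpha['v'] = alpha['v']+1
--         elif ch == 'w':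
--             alpha['w'] = alpha['w']+1
--         elif ch == 'x':
--             alpha['x'] = alpha['x']+1
--         elif ch == 'y':
--             alpha['y'] = alpha['y']+1
--         elif ch == 'z':
--             alpha['z'] = alpha['z']+1
--         elif ch == ' ':
--             alpha[' '] = alpha[' ']+1
--         else:
--             pass
--     return alpha
-- ===== SOURCE B (Python) =====
-- def alphaCounter(text):
--     return {c: text.count(c) for c in "abcdefghijklmnopqrstuvwxyz "}
-- ===== Notes on version B (the rewrite author's own statement) =====
-- stated objective: simpler
-- what changed: Replaces the 27-branch per-character dispatch loop that maintains a running dict with a one-line dict comprehension that counts each of the 27 fixed keys directly via text.count.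
import Mathlib
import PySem

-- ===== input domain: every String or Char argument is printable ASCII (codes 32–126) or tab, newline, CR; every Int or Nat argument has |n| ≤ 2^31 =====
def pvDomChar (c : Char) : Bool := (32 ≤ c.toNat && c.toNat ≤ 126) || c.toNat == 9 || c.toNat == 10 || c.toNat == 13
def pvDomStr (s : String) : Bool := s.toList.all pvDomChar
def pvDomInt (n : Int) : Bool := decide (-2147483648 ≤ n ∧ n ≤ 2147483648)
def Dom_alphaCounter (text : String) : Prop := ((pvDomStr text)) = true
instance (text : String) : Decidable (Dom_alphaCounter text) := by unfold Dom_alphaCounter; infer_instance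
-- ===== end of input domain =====

-- B replaces A's 27-branch per-character dispatch loop with a per-key count over the fixed 27 keys (objective: simpler); return values agree on all strings.

-- ===== PORT A =====
-- the literal dict A initialises (27 keys, all 0)
def pvAlphaInit : PySem.Dict String Int := PySem.Dict.ofList [("a",0),("b",0),("c",0),("d",0),("e",0),("f",0),("g",0),("h",0),("i",0),("j",0),("k",0),("l",0),("m",0),("n",0),("o",0),("p",0),("q",0),("r",0),("s",0),("t",0),("u",0),("v",0),("w",0),("x",0),("y",0),("z",0),(" ",0)]

-- the body of A's 'for ch in text' loop: the 27-way elif chain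
def alphaStep (alpha : PySem.Dict String Int) (ch : Char) : PySem.Dict String Int :=
  if ch = 'a' then alpha.modify "a" 0 (· + 1)
  else if ch = 'b' then alpha.modify "b" 0 (· + 1)
  else if ch = 'c' then alpha.modify "c" 0 (· + 1)
  else if ch = 'd' then alpha.modify "d" 0 (· + 1)
  else if ch = 'e' then alpha.modify "e" 0 (· + 1)
  else if ch = 'f' then alpha.modify "f" 0 (· + 1)
  else if ch = 'g' then alpha.modify "g" 0 (· + 1)
  else if ch = 'h' then alpha.modify "h" 0 (· + 1)
  else if ch = 'i' then alpha.modify "i" 0 (· + 1)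
  else if ch = 'j' then alpha.modify "j" 0 (· + 1)
  else if ch = 'k' then alpha.modify "k" 0 (· + 1)
  else if ch = 'l' then alpha.modify "l" 0 (· + 1)
  else if ch = 'm' then alpha.modify "m" 0 (· + 1)
  else if ch = 'n' then alpha.modify "n" 0 (· + 1)
  else if ch = 'o' then alpha.modify "o" 0 (· + 1)
  else if ch = 'p' then alpha.modify "p" 0 (· + 1)
  else if ch = 'q' then alpha.modify "q" 0 (· + 1)
  else if ch = 'r' then alpha.modify "r" 0 (· + 1)
  else if ch = 's' then alpha.modify "s" 0 (· + 1)
  else if ch = 't' then alpha.modify "t" 0 (· + 1)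
  else if ch = 'u' then alpha.modify "u" 0 (· + 1)
  else if ch = 'v' then alpha.modify "v" 0 (· + 1)
  else if ch = 'w' then alpha.modify "w" 0 (· + 1)
  else if ch = 'x' then alpha.modify "x" 0 (· + 1)
  else if ch = 'y' then alpha.modify "y" 0 (· + 1)
  else if ch = 'z' then alpha.modify "z" 0 (· + 1)
  else if ch = ' ' then alpha.modify " " 0 (· + 1)
  else alpha

def alphaCounter (text : String) : List (String × Int) :=
  (text.toList.foldl alphaStep pvAlphaInit).items

-- ===== PORT B =====
def alphaCounter_alt (text : String) : List (String × Int) :=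
  "abcdefghijklmnopqrstuvwxyz ".toList.map
    (fun c => (String.ofList [c], (PySem.Str.count text (String.ofList [c]) : Int)))

-- ===== PRECONDITION & SPEC =====
def Spec_alphaCounter (text : String) (out : List (String × Int)) : Prop := out = alphaCounter_alt text
instance (text : String) (out : List (String × Int)) : Decidable (Spec_alphaCounter text out) := by unfold Spec_alphaCounter; infer_instance

-- ===== CLAIM (what is proved, stated in full; the proofs are below) =====
def Claim_equal_alphaCounter : Prop := ∀ (text : String), Dom_alphaCounter text → Spec_alphaCounter text (alphaCounter text)

-- ===== LEMMAS AND PROOFS =====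

-- the 27 keys as characters
def pvChars : List Char := ['a','b','c','d','e','f','g','h','i','j','k','l','m','n','o','p','q','r','s','t','u','v','w','x','y','z',' ']

-- Chars.count with a single-character needle is List.count
lemma go_singleton (c : Char) : ∀ (l : List Char) (fuel acc : Nat), l.length ≤ fuel →
    PySem.Chars.count.go [c] fuel l acc = acc + l.count c := by
  intro l
  induction l with
  | nil => intro fuel acc h; cases fuel <;> simp [PySem.Chars.count.go]
  | cons h t ih =>
    intro fuel acc hle
    cases fuel with
    | zero => simp at hle
    | succ n =>
      simp only [PySem.Chars.count.go]
      by_cases hc : c = h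
      · subst hc
        simp [List.isPrefixOf, ih n (acc + 1) (by simp at hle; omega)]
        omega
      · simp [List.isPrefixOf, hc, ih n acc (by simp at hle; omega), Ne.symm hc]

lemma count_singleton (l : List Char) (c : Char) : PySem.Chars.count l [c] = l.count c := by
  simp [PySem.Chars.count, go_singleton c l l.length 0 le_rfl]

-- A's elif chain, summarised: modify the matched key, else do nothing
lemma alphaStep_eq (d : PySem.Dict String Int) (ch : Char) :
    alphaStep d ch = if ch ∈ pvChars then d.modify (String.ofList [ch]) 0 (· + 1) else d := by
  by_cases h1 : ch = 'a'
  · subst h1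
    have hm : ('a' : Char) ∈ pvChars := by decide
    simp [alphaStep, hm]
  by_cases h2 : ch = 'b'
  · subst h2
    have hm : ('b' : Char) ∈ pvChars := by decide
    simp [alphaStep, hm]
  by_cases h3 : ch = 'c'
  · subst h3
    have hm : ('c' : Char) ∈ pvChars := by decide
    simp [alphaStep, hm]
  by_cases h4 : ch = 'd'
  · subst h4
    have hm : ('d' : Char) ∈ pvChars := by decide
    simp [alphaStep, hm]
  by_cases h5 : ch = 'e'
  · subst h5
    have hm : ('e' : Char) ∈ pvChars := by decide
    simp [alphaStep, hm]
  by_cases h6 : ch = 'f'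
  · subst h6
    have hm : ('f' : Char) ∈ pvChars := by decide
    simp [alphaStep, hm]
  by_cases h7 : ch = 'g'
  · subst h7
    have hm : ('g' : Char) ∈ pvChars := by decide
    simp [alphaStep, hm]
  by_cases h8 : ch = 'h'
  · subst h8
    have hm : ('h' : Char) ∈ pvChars := by decide
    simp [alphaStep, hm]
  by_cases h9 : ch = 'i'
  · subst h9
    have hm : ('i' : Char) ∈ pvChars := by decide
    simp [alphaStep, hm]
  by_cases h10 : ch = 'j'
  · subst h10
    have hm : ('j' : Char) ∈ pvChars := by decide
    simp [alphaStep, hm]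
  by_cases h11 : ch = 'k'
  · subst h11
    have hm : ('k' : Char) ∈ pvChars := by decide
    simp [alphaStep, hm]
  by_cases h12 : ch = 'l'
  · subst h12
    have hm : ('l' : Char) ∈ pvChars := by decide
    simp [alphaStep, hm]
  by_cases h13 : ch = 'm'
  · subst h13
    have hm : ('m' : Char) ∈ pvChars := by decide
    simp [alphaStep, hm]
  by_cases h14 : ch = 'n'
  · subst h14
    have hm : ('n' : Char) ∈ pvChars := by decide
    simp [alphaStep, hm]
  by_cases h15 : ch = 'o'
  · subst h15
    have hm : ('o' : Char) ∈ pvChars := by decide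
    simp [alphaStep, hm]
  by_cases h16 : ch = 'p'
  · subst h16
    have hm : ('p' : Char) ∈ pvChars := by decide
    simp [alphaStep, hm]
  by_cases h17 : ch = 'q'
  · subst h17
    have hm : ('q' : Char) ∈ pvChars := by decide
    simp [alphaStep, hm]
  by_cases h18 : ch = 'r'
  · subst h18
    have hm : ('r' : Char) ∈ pvChars := by decide
    simp [alphaStep, hm]
  by_cases h19 : ch = 's'
  · subst h19
    have hm : ('s' : Char) ∈ pvChars := by decide
    simp [alphaStep, hm]
  by_cases h20 : ch = 't'
  · subst h20
    have hm : ('t' : Char) ∈ pvChars := by decide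
    simp [alphaStep, hm]
  by_cases h21 : ch = 'u'
  · subst h21
    have hm : ('u' : Char) ∈ pvChars := by decide
    simp [alphaStep, hm]
  by_cases h22 : ch = 'v'
  · subst h22
    have hm : ('v' : Char) ∈ pvChars := by decide
    simp [alphaStep, hm]
  by_cases h23 : ch = 'w'
  · subst h23
    have hm : ('w' : Char) ∈ pvChars := by decide
    simp [alphaStep, hm]
  by_cases h24 : ch = 'x'
  · subst h24
    have hm : ('x' : Char) ∈ pvChars := by decide
    simp [alphaStep, hm]
  by_cases h25 : ch = 'y'
  · subst h25
    have hm : ('y' : Char) ∈ pvChars := by decide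
    simp [alphaStep, hm]
  by_cases h26 : ch = 'z'
  · subst h26
    have hm : ('z' : Char) ∈ pvChars := by decide
    simp [alphaStep, hm]
  by_cases h27 : ch = ' '
  · subst h27
    have hm : (' ' : Char) ∈ pvChars := by decide
    simp [alphaStep, hm]
  simp [alphaStep, pvChars, h1, h2, h3, h4, h5, h6, h7, h8, h9, h10, h11, h12, h13, h14, h15, h16, h17, h18, h19, h20, h21, h22, h23, h24, h25, h26, h27]

lemma keys_foldl_alphaStep : ∀ (l : List Char) (d : PySem.Dict String Int),
    (∀ c ∈ pvChars, d.contains (String.ofList [c]) = true) →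
    (l.foldl alphaStep d).keys = d.keys := by
  intro l
  induction l with
  | nil => intro d _; rfl
  | cons ch t ih =>
    intro d hcont
    rw [List.foldl_cons, alphaStep_eq]
    by_cases h : ch ∈ pvChars
    · rw [if_pos h]
      have hk := hcont ch h
      have hkeys : (d.modify (String.ofList [ch]) 0 (· + 1)).keys = d.keys := by
        rw [PySem.Dict.keys_modify, PySem.Dict.keys_insert_of_contains _ _ hk]
      rw [ih _ (fun c hc => by rw [PySem.Dict.contains_modify]; simp [hcont c hc]), hkeys]
    · rw [if_neg h]; exact ih d hcont

lemma getD_foldl_alphaStep (c : Char) (hc : c ∈ pvChars) : ∀ (l : List Char) (d : PySem.Dict String Int),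
    (l.foldl alphaStep d).getD (String.ofList [c]) 0 = d.getD (String.ofList [c]) 0 + l.count c := by
  intro l
  induction l with
  | nil => intro d; simp
  | cons ch t ih =>
    intro d
    rw [List.foldl_cons, alphaStep_eq]
    by_cases h : ch ∈ pvChars
    · rw [if_pos h, ih]
      by_cases hce : c = ch
      · subst hce
        rw [PySem.Dict.getD_modify_self]
        simp
        omega
      · have hne : String.ofList [c] ≠ String.ofList [ch] := by
          simpa [String.ofList_inj] using hce
        rw [PySem.Dict.getD_modify_of_ne _ _ _ hne]
        simp [Ne.symm hce]
    · rw [if_neg h, ih]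
      have hne : c ≠ ch := fun he => h (he ▸ hc)
      simp [Ne.symm hne]

-- ===== VERDICT (by name: the statement is the Claim_ definition above) =====
set_option maxRecDepth 4096 in
theorem alphaCounter_spec : Claim_equal_alphaCounter := by
  intro text _
  unfold Spec_alphaCounter alphaCounter alphaCounter_alt
  have hcont : ∀ c ∈ pvChars, pvAlphaInit.contains (String.ofList [c]) = true := by
    intro c hc; fin_cases hc <;> decide
  have hkeys := keys_foldl_alphaStep text.toList pvAlphaInit hcont
  have hnd : (text.toList.foldl alphaStep pvAlphaInit).keys.Nodup := by rw [hkeys]; decide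
  have hkeq : pvAlphaInit.keys = pvChars.map (fun c => String.ofList [c]) := by decide
  have hlist : "abcdefghijklmnopqrstuvwxyz ".toList = pvChars := by decide
  rw [PySem.Dict.items_eq_map_keys _ hnd 0, hkeys, hkeq, hlist, List.map_map]
  apply List.map_congr_left
  intro c hc
  have h0 : pvAlphaInit.getD (String.ofList [c]) 0 = 0 := by fin_cases hc <;> decide
  simp only [Function.comp]
  rw [getD_foldl_alphaStep c hc, h0, PySem.Str.count_eq, String.toList_ofList, count_singleton]
  simp
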